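-- pv_equiv track=rewrite | github.com/SampsonTse/HighEducationAnalysis | code/provincereport.py | judge_km_wenli
-- ===== SOURCE A (Python) =====
-- def judge_km_wenli(km_ids):
--     lk_km_id = []
--     wk_km_id = []
--
--
--     for km_id in km_ids:
--         if km_id == '002' or km_id == '005':
--             lk_km_id.append(km_id)
--         elif km_id == '003'or km_id == '006':
--             wk_km_id.append(km_id)
--         else:
--             lk_km_id.append(km_id)
--             wk_km_id.append(km_id)
--
--
--     return lk_km_id,wk_km_id
-- ===== SOURCE B (Python) =====
-- def judge_km_wenli(km_ids):
--     ids = list(km_ids)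
--     lk = [x for x in ids if x not in ('003', '006')]
--     wk = [x for x in ids if x not in ('002', '005')]
--     return lk, wk
-- ===== Notes on version B (the rewrite author's own statement) =====
-- stated objective: simpler
-- what changed: Replaces the single routing loop with two independent filtered passes, each defined by the ids it excludes.
import Mathlib
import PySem

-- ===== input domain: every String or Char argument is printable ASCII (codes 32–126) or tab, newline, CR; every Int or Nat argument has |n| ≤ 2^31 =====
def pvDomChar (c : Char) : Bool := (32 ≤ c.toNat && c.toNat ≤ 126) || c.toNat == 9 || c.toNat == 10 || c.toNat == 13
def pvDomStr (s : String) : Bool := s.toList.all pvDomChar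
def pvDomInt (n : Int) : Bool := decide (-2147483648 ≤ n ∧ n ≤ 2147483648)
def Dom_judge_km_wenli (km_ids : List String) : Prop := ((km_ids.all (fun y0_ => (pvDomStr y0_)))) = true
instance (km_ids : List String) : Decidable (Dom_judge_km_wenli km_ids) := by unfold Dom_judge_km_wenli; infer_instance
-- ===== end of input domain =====

-- B builds the two output lists with two independent filtered passes instead of A's single routing loop (simpler decomposition).


-- ===== PORT A =====
-- single loop routing each id to one or both accumulators (appends at the end)
def judge_km_wenli (km_ids : List String) : List String × List String :=
  km_ids.foldl
    (fun (acc : List String × List String) km_id =>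
      if km_id = "002" ∨ km_id = "005" then (acc.1 ++ [km_id], acc.2)
      else if km_id = "003" ∨ km_id = "006" then (acc.1, acc.2 ++ [km_id])
      else (acc.1 ++ [km_id], acc.2 ++ [km_id]))
    ([], [])

-- ===== PORT B =====
-- two independent filtered passes, each defined by the ids it excludes
def judge_km_wenli_alt (km_ids : List String) : List String × List String :=
  (km_ids.filter (fun x => ¬ (x = "003" ∨ x = "006")),
   km_ids.filter (fun x => ¬ (x = "002" ∨ x = "005")))

-- ===== PRECONDITION & SPEC =====
def Spec_judge_km_wenli (km_ids : List String) (out : List String × List String) : Prop := out = judge_km_wenli_alt km_ids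
instance (km_ids : List String) (out : List String × List String) : Decidable (Spec_judge_km_wenli km_ids out) := by unfold Spec_judge_km_wenli; infer_instance

-- ===== CLAIM =====
def Claim_equal_judge_km_wenli : Prop := ∀ (km_ids : List String), Dom_judge_km_wenli km_ids → Spec_judge_km_wenli km_ids (judge_km_wenli km_ids)

-- ===== LEMMAS AND PROOFS =====
theorem judge_km_wenli_foldl (km_ids : List String) (lk wk : List String) :
    km_ids.foldl
      (fun (acc : List String × List String) km_id =>
        if km_id = "002" ∨ km_id = "005" then (acc.1 ++ [km_id], acc.2)
        else if km_id = "003" ∨ km_id = "006" then (acc.1, acc.2 ++ [km_id])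
        else (acc.1 ++ [km_id], acc.2 ++ [km_id]))
      (lk, wk)
    = (lk ++ km_ids.filter (fun x => ¬ (x = "003" ∨ x = "006")),
       wk ++ km_ids.filter (fun x => ¬ (x = "002" ∨ x = "005"))) := by
  induction km_ids generalizing lk wk with
  | nil => simp
  | cons h t ih =>
    simp only [List.foldl_cons, List.filter_cons]
    by_cases h25 : h = "002" ∨ h = "005"
    · have h36 : ¬ (h = "003" ∨ h = "006") := by rcases h25 with h' | h' <;> subst h' <;> decide
      simp [h25, h36, ih]
    · by_cases h36 : h = "003" ∨ h = "006"
      · have : ¬ ¬ (h = "003" ∨ h = "006") := not_not_intro h36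
        simp [h25, h36, ih]
      · simp [h25, h36, ih]

-- ===== VERDICT =====
theorem judge_km_wenli_spec : Claim_equal_judge_km_wenli := by
  intro km_ids _
  unfold Spec_judge_km_wenli judge_km_wenli judge_km_wenli_alt
  simpa using judge_km_wenli_foldl km_ids [] []
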